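-- pv_equiv track=rewrite | github.com/Henrique-zoo/APC | Nível 2/3960 - CorrijaMinhaRedacao.py | somandoIndice
-- ===== SOURCE A (Python) =====
-- def somandoIndice(a, iEntreAspas, separador):
--     j = 0
--     indices = []
--     for i in range(len(a)):
--         if a[i] == separador:
--             j += 1
--         if j > 0:
--             for k in range(j):
--                 i += iEntreAspas[k] - 1
--         indices.append(i)
--     return indices
-- ===== SOURCE B (Python) =====
-- def somandoIndice(a, iEntreAspas, separador):
--     out = []
--     off = 0
--     j = 0
--     for i, ch in enumerate(a):
--         if ch == separador:
--             off += iEntreAspas[j] - 1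
--             j += 1
--         out.append(i + off)
--     return out
-- ===== Notes on version B (the rewrite author's own statement) =====
-- stated objective: alternative
-- what changed: B keeps a running offset updated once per separator instead of re-summing the whole prefix iEntreAspas[0..j) at every character; on the measured inputs (few separators) this is not measurably faster.
import Mathlib
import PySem

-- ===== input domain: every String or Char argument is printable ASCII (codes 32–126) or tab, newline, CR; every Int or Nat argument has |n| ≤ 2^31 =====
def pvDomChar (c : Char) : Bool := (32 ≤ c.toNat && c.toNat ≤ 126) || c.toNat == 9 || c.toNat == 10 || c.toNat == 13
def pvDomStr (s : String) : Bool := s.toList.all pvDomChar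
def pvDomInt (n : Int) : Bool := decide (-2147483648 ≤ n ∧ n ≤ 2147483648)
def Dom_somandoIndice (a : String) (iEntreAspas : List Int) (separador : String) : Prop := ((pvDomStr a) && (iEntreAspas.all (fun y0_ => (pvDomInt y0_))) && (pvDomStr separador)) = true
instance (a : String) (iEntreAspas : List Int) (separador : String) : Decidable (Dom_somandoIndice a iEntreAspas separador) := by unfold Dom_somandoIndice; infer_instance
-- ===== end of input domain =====

-- B replaces A's per-character re-summation of iEntreAspas[0..j) by a running offset updated once per separator.


-- ===== PORT A =====
-- inner loop 'for k in range(j): i += iEntreAspas[k] - 1' (indexing safe under Pre_)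
def pvInnerSum (xs : List Int) (j : Int) : Int :=
  (PySem.List.pyRange 0 j 1).foldl (fun acc k => acc + ((PySem.List.pyGet? xs k).getD 0 - 1)) 0

def pvALoop (sep : String) (xs : List Int) : List (Int × Char) → Int → List Int
  | [], _ => []
  | (i, c) :: rest, j =>
    let j' := if String.mk [c] = sep then j + 1 else j
    let iv := if j' > 0 then i + pvInnerSum xs j' else i
    iv :: pvALoop sep xs rest j'

def somandoIndice (a : String) (iEntreAspas : List Int) (separador : String) : List Int :=
  pvALoop separador iEntreAspas (PySem.List.enumerate a.toList) 0

-- ===== PORT B =====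
def pvBLoop (sep : String) (xs : List Int) : List (Int × Char) → Int → Int → List Int
  | [], _, _ => []
  | (i, c) :: rest, j, off =>
    if String.mk [c] = sep then
      let off' := off + ((PySem.List.pyGet? xs j).getD 0 - 1)
      (i + off') :: pvBLoop sep xs rest (j + 1) off'
    else
      (i + off) :: pvBLoop sep xs rest j off

def somandoIndice_alt (a : String) (iEntreAspas : List Int) (separador : String) : List Int :=
  pvBLoop separador iEntreAspas (PySem.List.enumerate a.toList) 0 0

-- ===== PRECONDITION & SPEC =====
-- Pre_ excludes exactly the inputs where Python A raises IndexError: when the number of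
-- characters of a equal to separador exceeds len(iEntreAspas).
def Pre_somandoIndice (a : String) (iEntreAspas : List Int) (separador : String) : Prop :=
  (a.toList.countP (fun c => String.mk [c] = separador)) ≤ iEntreAspas.length
instance (a : String) (iEntreAspas : List Int) (separador : String) : Decidable (Pre_somandoIndice a iEntreAspas separador) := by unfold Pre_somandoIndice; infer_instance

def pvWitness_somandoIndice : String × List Int × String := ("a,b,c", [3, 4], ",")

def Spec_somandoIndice (a : String) (iEntreAspas : List Int) (separador : String) (out : List Int) : Prop := out = somandoIndice_alt a iEntreAspas separador
instance (a : String) (iEntreAspas : List Int) (separador : String) (out : List Int) : Decidable (Spec_somandoIndice a iEntreAspas separador out) := by unfold Spec_somandoIndice; infer_instance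

-- ===== CLAIM (what is proved, stated in full; the proofs are below) =====
def Claim_equal_somandoIndice : Prop := ∀ (a : String) (iEntreAspas : List Int) (separador : String), Dom_somandoIndice a iEntreAspas separador → Pre_somandoIndice a iEntreAspas separador → Spec_somandoIndice a iEntreAspas separador (somandoIndice a iEntreAspas separador)

-- ===== LEMMAS AND PROOFS =====
theorem pvInnerSum_zero (xs : List Int) : pvInnerSum xs 0 = 0 := by
  simp [pvInnerSum, PySem.List.pyRange_zero]

theorem pvInnerSum_succ (xs : List Int) (j : Int) (hj : 0 ≤ j) :
    pvInnerSum xs (j + 1) = pvInnerSum xs j + ((PySem.List.pyGet? xs j).getD 0 - 1) := by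
  unfold pvInnerSum
  rw [PySem.List.pyRange_one_succ_right hj, List.foldl_append]
  simp

theorem pvLoop_eq (sep : String) (xs : List Int) (l : List (Int × Char)) (j : Int)
    (hj : 0 ≤ j) :
    pvALoop sep xs l j = pvBLoop sep xs l j (pvInnerSum xs j) := by
  induction l generalizing j with
  | nil => simp [pvALoop, pvBLoop]
  | cons p rest ih =>
    obtain ⟨i, c⟩ := p
    by_cases hc : String.mk [c] = sep
    · simp only [pvALoop, pvBLoop, hc, if_pos, if_true]
      rw [← pvInnerSum_succ xs j hj]
      have hpos : j + 1 > 0 := by omega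
      simp only [hpos, if_true, if_pos hpos]
      rw [ih (j + 1) (by omega)]
    · simp only [pvALoop, pvBLoop, hc, if_neg hc, if_false]
      rw [ih j hj]
      by_cases hj0 : j > 0
      · simp [hj0]
      · have : j = 0 := by omega
        subst this
        simp [pvInnerSum_zero]

-- ===== VERDICT (by name: the statement is the Claim_ definition above) =====
theorem somandoIndice_spec : Claim_equal_somandoIndice := by
  intro a xs sep _ _
  unfold Spec_somandoIndice somandoIndice somandoIndice_alt
  rw [pvLoop_eq sep xs _ 0 le_rfl, pvInnerSum_zero]
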